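-- pv_equiv track=rewrite | github.com/cthompson7/MIS3640 | Session08/quiz.py | sum_cubes_of_odd_numbers
-- ===== SOURCE A (Python) =====
-- def sum_cubes_of_odd_numbers(n):
--     s = 1
--     sumOfCubes = 0
--     while s <= n:
--         if n == 1:
--             return 1
--         if s % n != 0:
--             sumOfCubes = sumOfCubes + s**3
--             s = s + 2
--             if s == n:
--                 sumOfCubes = sumOfCubes + s**3
--                 return sumOfCubes
--     return sumOfCubes
-- ===== SOURCE B (Python) =====
-- def sum_cubes_of_odd_numbers(n):
--     # Closed form: with k odd numbers in 1..n, sum of their cubes is k^2*(2*k^2 - 1).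
--     k = max(0, (n + 1) // 2)
--     return k * k * (2 * k * k - 1)
-- ===== Notes on version B (the rewrite author's own statement) =====
-- stated objective: faster
-- what changed: Replaced the step-by-2 accumulation loop with the O(1) closed form k^2(2k^2-1) where k = max(0,(n+1)//2) is the count of odd numbers up to n.
import Mathlib
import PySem

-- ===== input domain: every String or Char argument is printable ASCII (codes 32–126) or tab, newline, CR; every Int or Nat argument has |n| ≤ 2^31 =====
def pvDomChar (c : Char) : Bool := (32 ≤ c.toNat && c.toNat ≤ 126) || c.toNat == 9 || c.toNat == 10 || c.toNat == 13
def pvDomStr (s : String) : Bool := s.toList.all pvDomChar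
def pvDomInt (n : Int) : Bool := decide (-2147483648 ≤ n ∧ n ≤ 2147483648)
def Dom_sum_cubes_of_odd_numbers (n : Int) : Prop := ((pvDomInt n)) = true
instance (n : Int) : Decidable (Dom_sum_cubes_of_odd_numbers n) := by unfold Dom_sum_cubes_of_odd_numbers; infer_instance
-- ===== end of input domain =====

-- B replaces A's step-by-2 accumulation loop with the O(1) closed form k^2*(2k^2-1), k = count of odds ≤ n.

-- ===== PORT A =====
-- Literal port of A's while-loop; fuel only makes the loop total (A's loop advances s by 2
-- each iteration whenever it continues, so n.toNat + 1 iterations always suffice).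
def sum_cubes_of_odd_numbers_loop (fuel : Nat) (n s sumOfCubes : Int) : Int :=
  match fuel with
  | 0 => sumOfCubes
  | fuel + 1 =>
    if s ≤ n then
      if n = 1 then 1
      else if PySem.Int.mod s n ≠ 0 then
        let sumOfCubes := sumOfCubes + s ^ 3
        let s := s + 2
        if s = n then sumOfCubes + s ^ 3
        else sum_cubes_of_odd_numbers_loop fuel n s sumOfCubes
      else sum_cubes_of_odd_numbers_loop fuel n s sumOfCubes
    else sumOfCubes

def sum_cubes_of_odd_numbers (n : Int) : Int :=
  sum_cubes_of_odd_numbers_loop (n.toNat + 1) n 1 0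

-- ===== PORT B =====
def sum_cubes_of_odd_numbers_alt (n : Int) : Int :=
  let k := max 0 (PySem.Int.floordiv (n + 1) 2)
  k * k * (2 * k * k - 1)

-- ===== PRECONDITION & SPEC =====
def Spec_sum_cubes_of_odd_numbers (n : Int) (out : Int) : Prop := out = sum_cubes_of_odd_numbers_alt n
instance (n : Int) (out : Int) : Decidable (Spec_sum_cubes_of_odd_numbers n out) := by unfold Spec_sum_cubes_of_odd_numbers; infer_instance

-- ===== CLAIM (what is proved, stated in full; the proofs are below) =====
def Claim_equal_sum_cubes_of_odd_numbers : Prop := ∀ (n : Int), Dom_sum_cubes_of_odd_numbers n → Spec_sum_cubes_of_odd_numbers n (sum_cubes_of_odd_numbers n)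

-- ===== LEMMAS AND PROOFS =====

def pvF (j : Int) : Int := j * j * (2 * j * j - 1)

theorem pvF_succ (j : Int) : pvF j + (2 * j + 1) ^ 3 = pvF (j + 1) := by
  unfold pvF; ring

theorem loop_invariant (n : Int) (hn : 2 ≤ n) :
    ∀ (fuel : Nat) (j : Int), 0 ≤ j → 2 * j + 1 < n → n - (2 * j + 1) < 2 * (fuel : Int) →
      sum_cubes_of_odd_numbers_loop fuel n (2 * j + 1) (pvF j) = pvF ((n + 1) / 2) := by
  intro fuel
  induction fuel with
  | zero => intro j _ h1 h2; omega
  | succ fuel ih =>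
    intro j hj h1 h2
    have hmod : PySem.Int.mod (2 * j + 1) n = 2 * j + 1 := by
      rw [PySem.Int.mod_eq_emod_of_pos (by omega)]
      exact Int.emod_eq_of_lt (by omega) h1
    simp only [sum_cubes_of_odd_numbers_loop, if_pos (by omega : 2 * j + 1 ≤ n),
      if_neg (by omega : ¬ n = 1), hmod, if_pos (by omega : ¬ (2 * j + 1 = 0))]
    by_cases hend : 2 * j + 1 + 2 = n
    · rw [if_pos hend]
      have h2j : (n + 1) / 2 = j + 2 := by omega
      rw [h2j]
      have : 2 * j + 1 + 2 = 2 * (j + 1) + 1 := by ring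
      rw [pvF_succ, this, pvF_succ]
      congr 1; ring
    · rw [if_neg hend]
      by_cases hlt : 2 * j + 1 + 2 < n
      · have : (2 * j + 1 + 2) = 2 * (j + 1) + 1 := by ring
        rw [pvF_succ, this]
        exact ih (j + 1) (by omega) (by omega) (by push_cast at h2 ⊢; omega)
      · -- s + 2 > n : the next check s ≤ n fails (or fuel is 0); accumulator is returned
        have hgt : n < 2 * j + 1 + 2 := by omega
        have hret : sum_cubes_of_odd_numbers_loop fuel n (2 * j + 1 + 2) (pvF j + (2 * j + 1) ^ 3)
            = pvF j + (2 * j + 1) ^ 3 := by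
          cases fuel with
          | zero => rfl
          | succ m => simp [sum_cubes_of_odd_numbers_loop, if_neg (by omega : ¬ 2 * j + 1 + 2 ≤ n)]
        rw [hret, pvF_succ]
        have : (n + 1) / 2 = j + 1 := by omega
        rw [this]

theorem alt_eq_pvF (n : Int) (hn : 1 ≤ n) :
    sum_cubes_of_odd_numbers_alt n = pvF ((n + 1) / 2) := by
  unfold sum_cubes_of_odd_numbers_alt pvF
  rw [PySem.Int.floordiv_eq_ediv_of_pos (by omega)]
  have : max 0 ((n + 1) / 2) = (n + 1) / 2 := by
    have : 0 ≤ (n + 1) / 2 := by omega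
    omega
  rw [this]

-- ===== VERDICT (by name: the statement is the Claim_ definition above) =====
theorem sum_cubes_of_odd_numbers_spec : Claim_equal_sum_cubes_of_odd_numbers := by
  intro n _
  unfold Spec_sum_cubes_of_odd_numbers sum_cubes_of_odd_numbers
  rcases lt_trichotomy n 1 with h | h | h
  · -- n < 1 : loop body never runs, A returns 0; k = 0 in B
    have hloop : sum_cubes_of_odd_numbers_loop (n.toNat + 1) n 1 0 = 0 := by
      simp [sum_cubes_of_odd_numbers_loop, if_neg (by omega : ¬ (1 : Int) ≤ n)]
    rw [hloop]
    unfold sum_cubes_of_odd_numbers_alt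
    rw [PySem.Int.floordiv_eq_ediv_of_pos (by omega)]
    have : (n + 1) / 2 ≤ 0 := by omega
    have : max 0 ((n + 1) / 2) = 0 := by omega
    rw [this]; ring
  · -- n = 1
    subst h
    rfl
  · -- n ≥ 2
    have hinv := loop_invariant n (by omega) (n.toNat + 1) 0 (by omega) (by omega)
      (by push_cast; omega)
    norm_num [pvF] at hinv
    rw [hinv, alt_eq_pvF n (by omega)]
    unfold pvF
    ring
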